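-- pv_equiv track=rewrite | github.com/kilito0118/My_BOJ | 백준/Gold/11238. Fibo/Fibo.py | pow_re
-- ===== SOURCE A (Python) =====
-- MD = 1000000007
--
-- def mat_mul(mat1,mat2,s1,s2):#행렬 곱하기
--     mat = [[0 for i in range(s2[1])] for i in range(s1[0])]
--     for i in range(s1[0]):
--         for j in range(s2[1]):
--             for k in range(s1[1]):
--                 mat[i][j]+=(mat1[i][k]*mat2[k][j])
--                 mat[i][j]%=MD
--     return mat
--
-- def pow_re(mat,s1,n):
--     if n==1 or n==0:
--         return mat
--     if n%2==0:
--         nmat = pow_re(mat,[2,2],n//2)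
--         return mat_mul(nmat,nmat,[2,2],[2,2])
--
--     else:
--         nmat=pow_re(mat,[2,2],n-1)
--         return mat_mul(nmat,mat,[2,2],[2,2])
-- ===== SOURCE B (Python) =====
-- MD = 1000000007
--
-- def _mul2(a, b):
--     return [[(a[i][0] * b[0][j] + a[i][1] * b[1][j]) % MD for j in range(2)]
--             for i in range(2)]
--
-- def pow_re(mat, s1, n):
--     if n == 0 or n == 1:
--         return mat
--     result = [[1, 0], [0, 1]]
--     base = [[mat[0][0], mat[0][1]], [mat[1][0], mat[1][1]]]
--     e = n
--     while e > 0: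
--         if e % 2 == 1:
--             result = _mul2(result, base)
--         base = _mul2(base, base)
--         e //= 2
--     return result
-- ===== Notes on version B (the rewrite author's own statement) =====
-- stated objective: alternative
-- what changed: Replaced A's top-down recursion (halve when even, decrement when odd, recomputing via recursive calls) by a single bottom-up iterative square-and-multiply loop over the bits of n with an explicit identity accumulator; A's n==0/n==1 early return of mat itself is kept.
import Mathlib
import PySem

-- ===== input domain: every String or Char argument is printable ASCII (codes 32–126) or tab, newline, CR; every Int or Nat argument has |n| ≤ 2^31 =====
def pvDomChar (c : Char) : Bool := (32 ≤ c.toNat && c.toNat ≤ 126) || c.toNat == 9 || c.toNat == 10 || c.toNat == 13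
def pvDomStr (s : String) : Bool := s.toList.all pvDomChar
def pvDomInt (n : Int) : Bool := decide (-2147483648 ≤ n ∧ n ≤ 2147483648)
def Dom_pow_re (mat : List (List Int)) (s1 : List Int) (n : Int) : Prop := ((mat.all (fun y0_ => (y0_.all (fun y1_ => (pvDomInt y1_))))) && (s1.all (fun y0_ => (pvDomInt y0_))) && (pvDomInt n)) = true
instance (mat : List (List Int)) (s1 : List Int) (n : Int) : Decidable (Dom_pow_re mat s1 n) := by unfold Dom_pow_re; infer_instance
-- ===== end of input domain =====

-- B replaces A's recursive halve/decrement recursion by a single iterative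
-- binary-exponentiation loop over the bits of n (same modulus, same 2x2 products);
-- objective: alternative decomposition (same O(log n) multiplication count).

def pvMD : Int := 1000000007

-- mat[i][j] for nonnegative indices; Python raises IndexError out of range
-- (those inputs are excluded by Pre_pow_re), the default 0 is never read there.
def gEl (m : List (List Int)) (i j : Nat) : Int := (m.getD i []).getD j 0

-- mat[i][j] = v (nonnegative indices, in range under Pre_)
def set2 (m : List (List Int)) (i j : Nat) (v : Int) : List (List Int) :=
  m.set i ((m.getD i []).set j v)

-- ===== PORT A =====
-- mat_mul: build the zero matrix, then the triple nested loop; mat[i][j] += …; mat[i][j] %= MD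
def matMulA (mat1 mat2 : List (List Int)) (s1 s2 : List Int) : List (List Int) :=
  let r := (PySem.List.pyGet? s1 0).getD 0
  let c := (PySem.List.pyGet? s2 1).getD 0
  let kk := (PySem.List.pyGet? s1 1).getD 0
  let mat0 := (PySem.List.pyRange 0 r 1).map (fun _ => (PySem.List.pyRange 0 c 1).map (fun _ => (0 : Int)))
  (PySem.List.pyRange 0 r 1).foldl (fun mat i =>
    (PySem.List.pyRange 0 c 1).foldl (fun mat j =>
      (PySem.List.pyRange 0 kk 1).foldl (fun mat k =>
        set2 mat i.toNat j.toNat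
          (PySem.Int.mod (gEl mat i.toNat j.toNat + gEl mat1 i.toNat k.toNat * gEl mat2 k.toNat j.toNat) pvMD))
        mat) mat) mat0

def pow_re (mat : List (List Int)) (s1 : List Int) (n : Int) : List (List Int) :=
  if _h1 : n = 1 ∨ n = 0 then mat
  else if _h2 : n < 0 then mat  -- totality guard only: Python recurses forever for n < 0 (outside Pre_)
  else if _h3 : PySem.Int.mod n 2 = 0 then
    let nmat := pow_re mat [2, 2] (PySem.Int.floordiv n 2)
    matMulA nmat nmat [2, 2] [2, 2]
  else
    let nmat := pow_re mat [2, 2] (n - 1)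
    matMulA nmat mat [2, 2] [2, 2]
termination_by n.toNat
decreasing_by
  · rw [PySem.Int.floordiv_eq_ediv_of_pos (by norm_num)]; omega
  · omega

-- ===== PORT B =====
-- _mul2: the 2x2 comprehension product mod MD
def mul2B (a b : List (List Int)) : List (List Int) :=
  (PySem.List.pyRange 0 2 1).map (fun i =>
    (PySem.List.pyRange 0 2 1).map (fun j =>
      PySem.Int.mod (gEl a i.toNat 0 * gEl b 0 j.toNat + gEl a i.toNat 1 * gEl b 1 j.toNat) pvMD))

-- the while-loop of B: square-and-multiply over the bits of e
def powLoopB (r b : List (List Int)) (e : Int) : List (List Int) :=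
  if _h : 0 < e then
    let r' := if PySem.Int.mod e 2 = 1 then mul2B r b else r
    powLoopB r' (mul2B b b) (PySem.Int.floordiv e 2)
  else r
termination_by e.toNat
decreasing_by rw [PySem.Int.floordiv_eq_ediv_of_pos (by norm_num)]; omega

def pow_re_alt (mat : List (List Int)) (s1 : List Int) (n : Int) : List (List Int) :=
  if n = 0 ∨ n = 1 then mat
  else powLoopB [[1, 0], [0, 1]]
        [[gEl mat 0 0, gEl mat 0 1], [gEl mat 1 0, gEl mat 1 1]] n

-- ===== PRECONDITION & SPEC =====
-- Pre_ excludes n < 0 (A recurses forever, RecursionError) and, for n ≥ 2, matrices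
-- without a full 2x2 top-left block (A's mat_mul raises IndexError there).
def Pre_pow_re (mat : List (List Int)) (s1 : List Int) (n : Int) : Prop :=
  0 ≤ n ∧ (n ≤ 1 ∨ (2 ≤ mat.length ∧ 2 ≤ (mat.getD 0 []).length ∧ 2 ≤ (mat.getD 1 []).length))
instance (mat : List (List Int)) (s1 : List Int) (n : Int) : Decidable (Pre_pow_re mat s1 n) := by
  unfold Pre_pow_re; infer_instance

def pvWitness_pow_re : List (List Int) × List Int × Int := ([[1, 1], [1, 0]], [2, 2], 5)

def Spec_pow_re (mat : List (List Int)) (s1 : List Int) (n : Int) (out : List (List Int)) : Prop := out = pow_re_alt mat s1 n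
instance (mat : List (List Int)) (s1 : List Int) (n : Int) (out : List (List Int)) : Decidable (Spec_pow_re mat s1 n out) := by unfold Spec_pow_re; infer_instance

-- ===== CLAIM (what is proved, stated in full; the proofs are below) =====
def Claim_equal_pow_re : Prop := ∀ (mat : List (List Int)) (s1 : List Int) (n : Int), Dom_pow_re mat s1 n → Pre_pow_re mat s1 n → Spec_pow_re mat s1 n (pow_re mat s1 n)

-- ===== LEMMAS AND PROOFS =====

-- 2x2 integer matrices as quadruples (row major)
def qOf (m : List (List Int)) : Int × Int × Int × Int := (gEl m 0 0, gEl m 0 1, gEl m 1 0, gEl m 1 1)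

def lOf (q : Int × Int × Int × Int) : List (List Int) := [[q.1, q.2.1], [q.2.2.1, q.2.2.2]]

def qMul (x y : Int × Int × Int × Int) : Int × Int × Int × Int :=
  (x.1 * y.1 + x.2.1 * y.2.2.1, x.1 * y.2.1 + x.2.1 * y.2.2.2,
   x.2.2.1 * y.1 + x.2.2.2 * y.2.2.1, x.2.2.1 * y.2.1 + x.2.2.2 * y.2.2.2)

def qRed (x : Int × Int × Int × Int) : Int × Int × Int × Int :=
  (x.1 % pvMD, x.2.1 % pvMD, x.2.2.1 % pvMD, x.2.2.2 % pvMD)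

def qOne : Int × Int × Int × Int := (1, 0, 0, 1)

def qPow (a : Int × Int × Int × Int) : Nat → Int × Int × Int × Int
  | 0 => qOne
  | k + 1 => qMul (qPow a k) a

theorem modMD (a : Int) : PySem.Int.mod a pvMD = a % pvMD :=
  PySem.Int.mod_eq_emod_of_pos (by norm_num [pvMD])

theorem qOf_lOf (q : Int × Int × Int × Int) : qOf (lOf q) = q := rfl

theorem qRed_idem (a : Int × Int × Int × Int) : qRed (qRed a) = qRed a := by
  simp [qRed, Int.emod_emod_of_dvd _ (dvd_refl pvMD)]

theorem qMul_assoc (a b c : Int × Int × Int × Int) : qMul (qMul a b) c = qMul a (qMul b c) := by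
  obtain ⟨a1, a2, a3, a4⟩ := a; obtain ⟨b1, b2, b3, b4⟩ := b; obtain ⟨c1, c2, c3, c4⟩ := c
  simp only [qMul, Prod.mk.injEq]
  refine ⟨by ring, by ring, by ring, by ring⟩

theorem qMul_one_left (a : Int × Int × Int × Int) : qMul qOne a = a := by
  obtain ⟨a1, a2, a3, a4⟩ := a
  simp only [qMul, qOne, Prod.mk.injEq]
  refine ⟨by ring, by ring, by ring, by ring⟩

theorem qMul_one_right (a : Int × Int × Int × Int) : qMul a qOne = a := by
  obtain ⟨a1, a2, a3, a4⟩ := a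
  simp only [qMul, qOne, Prod.mk.injEq]
  refine ⟨by ring, by ring, by ring, by ring⟩

theorem qMul_cong {a a' b b' : Int × Int × Int × Int} (ha : qRed a = qRed a') (hb : qRed b = qRed b') :
    qRed (qMul a b) = qRed (qMul a' b') := by
  obtain ⟨a1, a2, a3, a4⟩ := a; obtain ⟨x1, x2, x3, x4⟩ := a'
  obtain ⟨b1, b2, b3, b4⟩ := b; obtain ⟨y1, y2, y3, y4⟩ := b'
  simp only [qRed, Prod.mk.injEq] at ha hb ⊢
  obtain ⟨e1, e2, e3, e4⟩ := ha; obtain ⟨f1, f2, f3, f4⟩ := hb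
  exact ⟨Int.ModEq.add (Int.ModEq.mul e1 f1) (Int.ModEq.mul e2 f3),
         Int.ModEq.add (Int.ModEq.mul e1 f2) (Int.ModEq.mul e2 f4),
         Int.ModEq.add (Int.ModEq.mul e3 f1) (Int.ModEq.mul e4 f3),
         Int.ModEq.add (Int.ModEq.mul e3 f2) (Int.ModEq.mul e4 f4)⟩

theorem qPow_cong {a b : Int × Int × Int × Int} (h : qRed a = qRed b) (k : Nat) :
    qRed (qPow a k) = qRed (qPow b k) := by
  induction k with
  | zero => rfl
  | succ k ih => exact qMul_cong ih h

theorem qPow_succ' (a : Int × Int × Int × Int) (k : Nat) : qPow a (k + 1) = qMul a (qPow a k) := by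
  induction k with
  | zero => simp [qPow, qMul_one_left, qMul_one_right]
  | succ k ih => calc qPow a (k + 2) = qMul (qPow a (k + 1)) a := rfl
      _ = qMul (qMul a (qPow a k)) a := by rw [ih]
      _ = qMul a (qPow a (k + 1)) := by rw [qMul_assoc]; rfl

theorem qPow_two_mul (a : Int × Int × Int × Int) (m : Nat) : qPow (qMul a a) m = qPow a (2 * m) := by
  induction m with
  | zero => rfl
  | succ m ih =>
      have : 2 * (m + 1) = (2 * m + 1) + 1 := by ring
      rw [this]
      calc qPow (qMul a a) (m + 1) = qMul (qPow (qMul a a) m) (qMul a a) := rfl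
        _ = qMul (qPow a (2 * m)) (qMul a a) := by rw [ih]
        _ = qMul (qMul (qPow a (2 * m)) a) a := by rw [qMul_assoc]
        _ = qPow a ((2 * m + 1) + 1) := rfl

theorem pyr2 : PySem.List.pyRange 0 2 1 = [0, 1] := by decide

theorem qPow_add (a : Int × Int × Int × Int) (i j : Nat) :
    qPow a (i + j) = qMul (qPow a i) (qPow a j) := by
  induction j with
  | zero => simp [qPow, qMul_one_right]
  | succ j ih =>
      calc qPow a (i + (j + 1)) = qMul (qPow a (i + j)) a := rfl
        _ = qMul (qMul (qPow a i) (qPow a j)) a := by rw [ih]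
        _ = qMul (qPow a i) (qMul (qPow a j) a) := by rw [qMul_assoc]
        _ = qMul (qPow a i) (qPow a (j + 1)) := rfl

theorem matMulA_22 (m1 m2 : List (List Int)) :
    matMulA m1 m2 [2, 2] [2, 2] = lOf (qRed (qMul (qOf m1) (qOf m2))) := by
  have hg0 : (PySem.List.pyGet? ([2, 2] : List Int) 0).getD 0 = 2 := by decide
  have hg1 : (PySem.List.pyGet? ([2, 2] : List Int) 1).getD 0 = 2 := by decide
  simp only [matMulA, hg0, hg1, pyr2]
  simp [set2, gEl, qOf, qMul, qRed, lOf, modMD, Int.emod_add_emod]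

theorem mul2B_eq (a b : List (List Int)) : mul2B a b = lOf (qRed (qMul (qOf a) (qOf b))) := by
  simp only [mul2B, pyr2]
  simp [gEl, qOf, qMul, qRed, lOf, modMD]

-- characterisation of A: for k ≥ 1 the result is congruent to matᵏ, and for k ≥ 2 it is
-- exactly the reduced matᵏ
theorem powA_char (mat : List (List Int)) : ∀ k : Nat, ∀ s1 : List Int, 1 ≤ k →
    qRed (qOf (pow_re mat s1 (k : Int))) = qRed (qPow (qOf mat) k) ∧
    (2 ≤ k → pow_re mat s1 (k : Int) = lOf (qRed (qPow (qOf mat) k))) := by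
  intro k
  induction k using Nat.strong_induction_on with
  | _ k ih =>
    intro s1 hk
    by_cases h1 : k = 1
    · subst h1
      have hbody : pow_re mat s1 ((1 : Nat) : Int) = mat := by
        rw [pow_re]; norm_num
      rw [hbody]
      refine ⟨?_, by omega⟩
      have : qPow (qOf mat) 1 = qOf mat := by
        show qMul qOne (qOf mat) = qOf mat; exact qMul_one_left _
      rw [this]
    · have hk2 : 2 ≤ k := by omega
      have hne : ¬ ((k : Int) = 1 ∨ (k : Int) = 0) := by omega
      have hnn : ¬ ((k : Int) < 0) := by omega
      have hmod : PySem.Int.mod (k : Int) 2 = (k : Int) % 2 :=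
        PySem.Int.mod_eq_emod_of_pos (by norm_num)
      have hdiv : PySem.Int.floordiv (k : Int) 2 = (k : Int) / 2 :=
        PySem.Int.floordiv_eq_ediv_of_pos (by norm_num)
      by_cases hpar : k % 2 = 0
      · -- even case
        set m : Nat := k / 2 with hm
        have hm1 : 1 ≤ m := by omega
        have hmk : m < k := by omega
        have hkm : k = m + m := by omega
        have hcast : (k : Int) / 2 = (m : Int) := by omega
        have hbody : pow_re mat s1 (k : Int) =
            matMulA (pow_re mat [2, 2] (m : Int)) (pow_re mat [2, 2] (m : Int)) [2, 2] [2, 2] := by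
          rw [pow_re, dif_neg hne, dif_neg hnn, dif_pos (by rw [hmod]; omega)]
          rw [hdiv, hcast]
        have hIH := (ih m hmk [2, 2] hm1).1
        have hred : qRed (qMul (qOf (pow_re mat [2, 2] (m : Int))) (qOf (pow_re mat [2, 2] (m : Int))))
            = qRed (qPow (qOf mat) k) := by
          rw [qMul_cong hIH hIH, ← qPow_add, ← hkm]
        rw [hbody, matMulA_22, hred]
        exact ⟨by rw [qOf_lOf, qRed_idem], fun _ => rfl⟩
      · -- odd case
        have hk3 : 3 ≤ k := by omega
        have hcast : (k : Int) - 1 = ((k - 1 : Nat) : Int) := by omega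
        have hbody : pow_re mat s1 (k : Int) =
            matMulA (pow_re mat [2, 2] ((k - 1 : Nat) : Int)) mat [2, 2] [2, 2] := by
          rw [pow_re, dif_neg hne, dif_neg hnn, dif_neg (by rw [hmod]; omega)]
          rw [hcast]
        have hIH := (ih (k - 1) (by omega) [2, 2] (by omega)).1
        have hred : qRed (qMul (qOf (pow_re mat [2, 2] ((k - 1 : Nat) : Int))) (qOf mat))
            = qRed (qPow (qOf mat) k) := by
          rw [qMul_cong hIH rfl]
          have : qPow (qOf mat) k = qMul (qPow (qOf mat) (k - 1)) (qOf mat) := by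
            have hs : k = (k - 1) + 1 := by omega
            rw [hs]; rfl
          rw [this]
        rw [hbody, matMulA_22, hred]
        exact ⟨by rw [qOf_lOf, qRed_idem], fun _ => rfl⟩

theorem powB_loop : ∀ e : Nat, ∀ r b : List (List Int), 1 ≤ e →
    powLoopB r b (e : Int) = lOf (qRed (qMul (qOf r) (qPow (qOf b) e))) := by
  intro e
  induction e using Nat.strong_induction_on with
  | _ e ih =>
    intro r b he
    have hpos : (0 : Int) < (e : Int) := by omega
    have hmod : PySem.Int.mod (e : Int) 2 = (e : Int) % 2 :=
      PySem.Int.mod_eq_emod_of_pos (by norm_num)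
    have hdiv : PySem.Int.floordiv (e : Int) 2 = (e : Int) / 2 :=
      PySem.Int.floordiv_eq_ediv_of_pos (by norm_num)
    by_cases he1 : e = 1
    · subst he1
      rw [powLoopB, dif_pos hpos, hmod, hdiv]
      have h0 : ((1 : Nat) : Int) / 2 = 0 := by omega
      rw [if_pos (by omega), h0, powLoopB, dif_neg (by omega)]
      rw [mul2B_eq]
      have : qPow (qOf b) 1 = qOf b := by
        show qMul qOne (qOf b) = qOf b; exact qMul_one_left _
      rw [this]
    · have he2 : 2 ≤ e := by omega
      set m : Nat := e / 2 with hmdef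
      have hm1 : 1 ≤ m := by omega
      have hme : m < e := by omega
      have hcast : (e : Int) / 2 = (m : Int) := by omega
      have hqb : qOf (mul2B b b) = qRed (qMul (qOf b) (qOf b)) := by
        rw [mul2B_eq, qOf_lOf]
      by_cases hpar : e % 2 = 0
      · have hkm : e = 2 * m := by omega
        rw [powLoopB, dif_pos hpos, hmod, hdiv, if_neg (by omega), hcast]
        rw [ih m hme r (mul2B b b) hm1, hqb]
        congr 1
        rw [qMul_cong (rfl : qRed (qOf r) = qRed (qOf r)) (qPow_cong (qRed_idem _) m)]
        rw [qPow_two_mul, ← hkm]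
      · have hkm : e = 2 * m + 1 := by omega
        rw [powLoopB, dif_pos hpos, hmod, hdiv, if_pos (by omega), hcast]
        rw [ih m hme (mul2B r b) (mul2B b b) hm1, hqb, mul2B_eq, qOf_lOf]
        congr 1
        rw [qMul_cong (qRed_idem _) (qPow_cong (qRed_idem _) m)]
        rw [qPow_two_mul]
        rw [qMul_assoc]
        rw [show qMul (qOf b) (qPow (qOf b) (2 * m)) = qPow (qOf b) (2 * m + 1) from
          (qPow_succ' (qOf b) (2 * m)).symm]
        rw [← hkm]

-- ===== VERDICT (by name: the statement is the Claim_ definition above) =====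
theorem pow_re_spec : Claim_equal_pow_re := by
  intro mat s1 n _hdom hpre
  obtain ⟨hn, -⟩ := hpre
  unfold Spec_pow_re
  by_cases h01 : n = 0 ∨ n = 1
  · rw [pow_re, pow_re_alt, dif_pos (by tauto), if_pos h01]
  · have h2 : 2 ≤ n := by omega
    set k : Nat := n.toNat with hk
    have hkn : n = (k : Int) := by omega
    have hk2 : 2 ≤ k := by omega
    have hA : pow_re mat s1 n = lOf (qRed (qPow (qOf mat) k)) := by
      rw [hkn]; exact (powA_char mat k s1 (by omega)).2 hk2
    have hbase : qOf ([[gEl mat 0 0, gEl mat 0 1], [gEl mat 1 0, gEl mat 1 1]]) = qOf mat := rfl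
    have hone : qOf ([[1, 0], [0, 1]] : List (List Int)) = qOne := rfl
    have hB : pow_re_alt mat s1 n = lOf (qRed (qPow (qOf mat) k)) := by
      rw [pow_re_alt, if_neg h01, hkn,
        powB_loop k [[1, 0], [0, 1]] [[gEl mat 0 0, gEl mat 0 1], [gEl mat 1 0, gEl mat 1 1]] (by omega),
        hbase, hone, qMul_one_left]
    rw [hA, hB]
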